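-- pv_equiv track=rewrite | github.com/NicolasMarinkovic/python-unsam | Clase02/diccionario_geringoso.py | geringoso
-- ===== SOURCE A (Python) =====
-- def geringoso(lista):
--     capadepenapa = ''
--     s = {}
--     for cadena in lista:
--         for c in cadena:
--             capadepenapa += c
--             if c == 'a' or c =='A':
--                 capadepenapa += 'pa'
--             elif c == 'e' or c =='E':
--                 capadepenapa += 'pe'
--             elif c == 'i' or c =='I':
--                 capadepenapa += 'pi'
--             elif c == 'o' or c =='O':
--                 capadepenapa += 'po'
--             elif c == 'u' or c =='U':
--                 capadepenapa += 'pu'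
--         s[cadena] = capadepenapa
--         capadepenapa = ''
--     return s
-- ===== SOURCE B (Python) =====
-- def geringoso(lista):
--     s = {}
--     for cadena in lista:
--         t = cadena
--         for i in range(len(cadena) - 1, -1, -1):
--             c = cadena[i]
--             if c in 'aeiouAEIOU':
--                 t = t[:i+1] + 'p' + c.lower() + t[i+1:]
--         s[cadena] = t
--     return s
-- ===== Notes on version B (the rewrite author's own statement) =====
-- stated objective: alternative
-- what changed: Instead of A's forward char-by-char accumulator with an if/elif vowel chain, B starts from the word itself and splices 'p'+lowercase-vowel into it after each vowel by slicing, scanning the vowel positions back-to-front so earlier indices stay valid.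
import Mathlib
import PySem

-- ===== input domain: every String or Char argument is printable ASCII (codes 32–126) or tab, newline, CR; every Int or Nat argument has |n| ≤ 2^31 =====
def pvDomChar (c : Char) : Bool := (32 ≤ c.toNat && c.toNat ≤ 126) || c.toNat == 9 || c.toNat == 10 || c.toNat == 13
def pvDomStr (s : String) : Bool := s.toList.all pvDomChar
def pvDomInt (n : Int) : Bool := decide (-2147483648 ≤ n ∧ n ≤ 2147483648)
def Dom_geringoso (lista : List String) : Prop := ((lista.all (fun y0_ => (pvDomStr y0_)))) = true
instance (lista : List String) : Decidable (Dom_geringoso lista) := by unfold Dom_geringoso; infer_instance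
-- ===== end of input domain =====

-- B replaces A's forward char-by-char accumulator (if/elif vowel chain) by in-place splicing:
-- it starts from the word and inserts 'p'+lowercase vowel after each vowel by slicing,
-- scanning the indices back-to-front; same result, a different construction of it.

-- ===== PORT A =====
-- A's inner loop body: append c, then append the 'pX' suffix chosen by the if/elif chain.
def gerStepA (capadepenapa : List Char) (c : Char) : List Char :=
  let capadepenapa := capadepenapa ++ [c]
  if c = 'a' ∨ c = 'A' then capadepenapa ++ ['p', 'a']
  else if c = 'e' ∨ c = 'E' then capadepenapa ++ ['p', 'e']
  else if c = 'i' ∨ c = 'I' then capadepenapa ++ ['p', 'i']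
  else if c = 'o' ∨ c = 'O' then capadepenapa ++ ['p', 'o']
  else if c = 'u' ∨ c = 'U' then capadepenapa ++ ['p', 'u']
  else capadepenapa

def geringoso (lista : List String) : List (String × String) :=
  (lista.foldl
    (fun s cadena => s.insert cadena (String.ofList (cadena.toList.foldl gerStepA [])))
    (PySem.Dict.empty : PySem.Dict String String)).items

-- ===== PORT B =====
-- Source B's inner loop body at index i: c = cadena[i]; if c is a vowel,
-- t = t[:i+1] + 'p' + c.lower() + t[i+1:]  (i is always in range, so pyGet? is some).
def gerStepB (w : List Char) (t : List Char) (i : Int) : List Char :=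
  match PySem.List.pyGet? w i with
  | none => t
  | some c =>
    if c ∈ ['a', 'e', 'i', 'o', 'u', 'A', 'E', 'I', 'O', 'U'] then
      PySem.List.slice t none (some (i + 1)) ++ 'p' :: PySem.Chars.lower [c]
        ++ PySem.List.slice t (some (i + 1)) none
    else t

-- the per-word loop: t = cadena; for i in range(len(cadena)-1, -1, -1): …
def gerWordB (w : List Char) : List Char :=
  (PySem.List.pyRange ((w.length : Int) - 1) (-1) (-1)).foldl (gerStepB w) w

def geringoso_alt (lista : List String) : List (String × String) :=
  (lista.foldl
    (fun s cadena => s.insert cadena (String.ofList (gerWordB cadena.toList)))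
    (PySem.Dict.empty : PySem.Dict String String)).items

-- ===== PRECONDITION & SPEC =====
def Spec_geringoso (lista : List String) (out : List (String × String)) : Prop := out = geringoso_alt lista
instance (lista : List String) (out : List (String × String)) : Decidable (Spec_geringoso lista out) := by unfold Spec_geringoso; infer_instance

-- ===== CLAIM (what is proved, stated in full; the proofs are below) =====
def Claim_equal_geringoso : Prop := ∀ (lista : List String), Dom_geringoso lista → Spec_geringoso lista (geringoso lista)

-- ===== LEMMAS AND PROOFS =====
-- the character-wise contribution both programs realise
def gerTable (c : Char) : List Char :=
  if c = 'a' ∨ c = 'A' then [c, 'p', 'a']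
  else if c = 'e' ∨ c = 'E' then [c, 'p', 'e']
  else if c = 'i' ∨ c = 'I' then [c, 'p', 'i']
  else if c = 'o' ∨ c = 'O' then [c, 'p', 'o']
  else if c = 'u' ∨ c = 'U' then [c, 'p', 'u']
  else [c]

theorem gerStepA_eq_table (acc : List Char) (c : Char) :
    gerStepA acc c = acc ++ gerTable c := by
  simp only [gerStepA, gerTable]
  split_ifs <;> simp

theorem gerFoldA_eq_flatMap (l : List Char) (acc : List Char) :
    l.foldl gerStepA acc = acc ++ l.flatMap gerTable := by
  induction l generalizing acc with
  | nil => simp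
  | cons c t ih =>
    rw [List.foldl_cons, ih, gerStepA_eq_table, List.flatMap_cons, List.append_assoc]

-- downward invariant for B's reverse-index splicing loop: after the indices k-1 … 0 run,
-- a state whose first k chars are still raw and whose tail is already transformed
-- becomes the fully transformed word.
theorem gerB_inv (l : List Char) (k : Nat) (hk : k ≤ l.length) :
    (PySem.List.pyRange ((k : Int) - 1) (-1) (-1)).foldl (gerStepB l)
      (l.take k ++ (l.drop k).flatMap gerTable) = l.flatMap gerTable := by
  induction k with
  | zero =>
    rw [PySem.List.pyRange_neg_one_eq_nil (by omega)]
    simp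
  | succ k ih =>
    have hkl : k < l.length := by omega
    rw [show (((k + 1 : Nat) : Int) - 1) = (k : Int) by push_cast; ring,
      PySem.List.pyRange_neg_one_cons (by omega), List.foldl_cons]
    have hstate : gerStepB l (l.take (k + 1) ++ (l.drop (k + 1)).flatMap gerTable) (k : Int)
        = l.take k ++ (l.drop k).flatMap gerTable := by
      have hget : PySem.List.pyGet? l (k : Int) = some l[k] := by
        simp [PySem.List.pyGet?_natCast, List.getElem?_eq_getElem hkl]
      have htk : (l.take (k + 1)).length = k + 1 := by simp [hkl]
      have htake : (l.take (k + 1) ++ (l.drop (k + 1)).flatMap gerTable).take (k + 1)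
          = l.take (k + 1) := by
        rw [List.take_append_of_le_length (by omega), List.take_take]
        simp
      have hdrop : (l.take (k + 1) ++ (l.drop (k + 1)).flatMap gerTable).drop (k + 1)
          = (l.drop (k + 1)).flatMap gerTable := by
        rw [List.drop_append_of_le_length (by omega)]
        simp
      have hdk : l.drop k = l[k] :: l.drop (k + 1) := List.drop_eq_getElem_cons hkl
      have htk1 : l.take (k + 1) = l.take k ++ [l[k]] := by
        rw [List.take_add_one, List.getElem?_eq_getElem hkl]
        rfl
      simp only [gerStepB, hget]
      have hc1 : ((k : Int) + 1) = ((k + 1 : Nat) : Int) := by push_cast; ring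
      split_ifs with hv
      · rw [hc1, PySem.List.slice_to_natCast, PySem.List.slice_from_natCast,
          htake, hdrop, htk1, hdk, List.flatMap_cons]
        simp only [List.mem_cons, List.not_mem_nil, or_false] at hv
        have hlow : 'p' :: PySem.Chars.lower [l[k]] = (gerTable l[k]).drop 1 := by
          rcases hv with h | h | h | h | h | h | h | h | h | h <;>
            · rw [h]; rfl
        rw [hlow]
        have hg1 : gerTable l[k] = l[k] :: (gerTable l[k]).drop 1 := by
          rcases hv with h | h | h | h | h | h | h | h | h | h <;>
            · rw [h]; rfl
        conv_rhs => rw [hg1]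
        simp only [List.append_assoc, List.cons_append]
        rw [List.nil_append]
      · have hone : gerTable l[k] = [l[k]] := by
          simp only [gerTable]
          split_ifs with h1 h2 h3 h4 h5 <;> first
          | rfl
          | (exfalso; apply hv; rcases ‹_ ∨ _› with h | h <;> simp [h])
        rw [hdk, List.flatMap_cons, hone, htk1]
        simp only [List.append_assoc, List.cons_append]
    rw [hstate, ih (by omega)]

theorem gerWordB_eq_flatMap (l : List Char) : gerWordB l = l.flatMap gerTable := by
  have := gerB_inv l l.length le_rfl
  simpa [gerWordB] using this

-- ===== VERDICT (by name: the statement is the Claim_ definition above) =====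
theorem geringoso_spec : Claim_equal_geringoso := by
  intro lista _
  show geringoso lista = geringoso_alt lista
  unfold geringoso geringoso_alt
  have hf : (fun (s : PySem.Dict String String) cadena =>
        s.insert cadena (String.ofList (cadena.toList.foldl gerStepA []))) =
      (fun s cadena => s.insert cadena (String.ofList (gerWordB cadena.toList))) := by
    funext s cadena
    rw [gerWordB_eq_flatMap, gerFoldA_eq_flatMap, List.nil_append]
  rw [hf]
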